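-- pv_equiv track=rewrite | github.com/juanlouisr/cryptarithmetic | src/tucil1.py | nilaiKata
-- ===== SOURCE A (Python) =====
-- def nilaiKata(word, dict):
--     total = 0
--     k = 1
--     dibalik = word[::-1]
--     for x in range(len(dibalik)):
--         total += dict[dibalik[x]] * k
--         k *= 10
--     return total
-- ===== SOURCE B (Python) =====
-- def nilaiKata(word, dict):
--     total = 0
--     for c in word:
--         total = total * 10 + dict[c]
--     return total
-- ===== Notes on version B (the rewrite author's own statement) =====
-- stated objective: simpler
-- what changed: Replaces the string reversal and running place-value multiplier with a single forward Horner pass (total = total*10 + dict[c]).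
import Mathlib
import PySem

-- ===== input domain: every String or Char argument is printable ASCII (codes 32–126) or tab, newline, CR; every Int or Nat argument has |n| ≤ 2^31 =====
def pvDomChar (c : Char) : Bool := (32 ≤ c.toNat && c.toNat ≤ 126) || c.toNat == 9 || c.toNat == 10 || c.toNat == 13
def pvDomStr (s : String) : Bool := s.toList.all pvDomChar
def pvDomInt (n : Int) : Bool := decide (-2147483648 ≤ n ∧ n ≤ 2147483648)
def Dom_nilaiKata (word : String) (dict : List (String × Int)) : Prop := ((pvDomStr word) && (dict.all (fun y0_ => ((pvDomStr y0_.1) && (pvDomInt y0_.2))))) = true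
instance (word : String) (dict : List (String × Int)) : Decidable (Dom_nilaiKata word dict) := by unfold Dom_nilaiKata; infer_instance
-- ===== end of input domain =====

-- B replaces A's string reversal and running place-value multiplier with a single forward
-- Horner pass (total = total*10 + dict[c]) — same O(n) cost, simpler decomposition.

-- ===== PORT A =====
-- A: reverse the word, then accumulate total += dict[c]*k with k *= 10 each step.
-- dict[c] is ported as Dict.getD … 0; Pre_ excludes the missing-key inputs (Python KeyError).
def nilaiKata (word : String) (dict : List (String × Int)) : Int :=
  let dibalik := word.toList.reverse
  (dibalik.foldl
    (fun (tk : Int × Int) c =>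
      (tk.1 + (PySem.Dict.mk dict).getD (String.singleton c) 0 * tk.2, tk.2 * 10))
    (0, 1)).1

-- ===== PORT B =====
def nilaiKata_alt (word : String) (dict : List (String × Int)) : Int :=
  word.toList.foldl
    (fun total c => total * 10 + (PySem.Dict.mk dict).getD (String.singleton c) 0) 0

-- ===== PRECONDITION & SPEC =====
-- Pre_ excludes exactly the inputs where Python A raises KeyError: a letter of word absent from dict.
def Pre_nilaiKata (word : String) (dict : List (String × Int)) : Prop :=
  word.toList.all (fun c => (PySem.Dict.mk dict).contains (String.singleton c)) = true
instance (word : String) (dict : List (String × Int)) : Decidable (Pre_nilaiKata word dict) := by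
  unfold Pre_nilaiKata; infer_instance
def pvWitness_nilaiKata : String × (List (String × Int)) := ("a", [("a", 1)])

def Spec_nilaiKata (word : String) (dict : List (String × Int)) (out : Int) : Prop := out = nilaiKata_alt word dict
instance (word : String) (dict : List (String × Int)) (out : Int) : Decidable (Spec_nilaiKata word dict out) := by unfold Spec_nilaiKata; infer_instance

-- ===== CLAIM (what is proved, stated in full; the proofs are below) =====
def Claim_equal_nilaiKata : Prop := ∀ (word : String) (dict : List (String × Int)), Dom_nilaiKata word dict → Pre_nilaiKata word dict → Spec_nilaiKata word dict (nilaiKata word dict)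

-- ===== LEMMAS AND PROOFS =====

-- A's loop is affine in its (total, k) state.
theorem foldlA_affine (g : Char → Int) (ds : List Char) (t k : Int) :
    ds.foldl (fun (tk : Int × Int) c => (tk.1 + g c * tk.2, tk.2 * 10)) (t, k)
      = (t + k * (ds.foldl (fun (tk : Int × Int) c => (tk.1 + g c * tk.2, tk.2 * 10)) (0, 1)).1,
         k * 10 ^ ds.length) := by
  induction ds generalizing t k with
  | nil => simp
  | cons c ds ih =>
    simp only [List.foldl_cons, List.length_cons]
    rw [ih (t + g c * k) (k * 10), ih (0 + g c * 1) (1 * 10)]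
    simp only [Prod.mk.injEq]
    constructor <;> ring

-- B's Horner loop is affine in its accumulator.
theorem foldlB_affine (g : Char → Int) (cs : List Char) (t : Int) :
    cs.foldl (fun a c => a * 10 + g c) t
      = t * 10 ^ cs.length + cs.foldl (fun a c => a * 10 + g c) 0 := by
  induction cs generalizing t with
  | nil => simp
  | cons c cs ih =>
    simp only [List.foldl_cons, List.length_cons]
    rw [ih (t * 10 + g c), ih (0 * 10 + g c)]
    ring

-- Core equivalence: reversed multiply-by-place fold = forward Horner fold.
theorem rev_eq_horner (g : Char → Int) (cs : List Char) :
    (cs.reverse.foldl (fun (tk : Int × Int) c => (tk.1 + g c * tk.2, tk.2 * 10)) (0, 1)).1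
      = cs.foldl (fun a c => a * 10 + g c) 0 := by
  induction cs with
  | nil => simp
  | cons c cs ih =>
    simp only [List.reverse_cons, List.foldl_append, List.foldl_cons, List.foldl_nil]
    rw [foldlA_affine g cs.reverse (0 : Int) 1]
    simp only [List.length_reverse]
    rw [ih]
    rw [foldlB_affine g cs (0 * 10 + g c)]
    ring

-- ===== VERDICT (by name: the statement is the Claim_ definition above) =====
theorem nilaiKata_spec : Claim_equal_nilaiKata := by
  intro word dict _ _
  unfold Spec_nilaiKata nilaiKata nilaiKata_alt
  exact rev_eq_horner (fun c => (PySem.Dict.mk dict).getD (String.singleton c) 0) word.toList
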